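-- pv_equiv track=rewrite | github.com/joistick11/edison-car | map_parser.py | convert_absolute_to_relative_action_chain
-- ===== SOURCE A (Python) =====
-- import operator
--
-- def convert_absolute_to_relative_action_chain(absolute_action_chain):
--     # calculate relative directions
--     directions = list(map(operator.itemgetter(0), absolute_action_chain))
--     current_abs = directions.pop(0)
--     relative_action_chain = ['forward']
--     while len(directions) > 0:
--         candidate_abs = directions.pop(0)
--         relative_action_chain.append(calculate_relative_with_new_abs(current_abs, candidate_abs))
--         current_abs = candidate_abs
--
--     # append relative directions with length
--     return list(map(lambda item: (item[1][0], item[0][1]), zip(absolute_action_chain, relative_action_chain)))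
--
-- def calculate_relative_with_new_abs(current_abs, candidate_abs):
--     if current_abs == 'u':
--         if candidate_abs == 'l':
--             return 'left'
--         elif candidate_abs == 'r':
--             return 'right'
--         elif candidate_abs == 'd':
--             return 'backward'
--     elif current_abs == 'r':
--         if candidate_abs == 'u':
--             return 'left'
--         elif candidate_abs == 'd':
--             return 'right'
--         elif candidate_abs == 'l':
--             return 'backward'
--     elif current_abs == 'd':
--         if candidate_abs == 'r':
--             return 'left'
--         elif candidate_abs == 'l':
--             return 'right'
--         elif candidate_abs == 'u':
--             return 'backward'
--     elif current_abs == 'l':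
--         if candidate_abs == 'u':
--             return 'right'
--         elif candidate_abs == 'd':
--             return 'left'
--         elif candidate_abs == 'r':
--             return 'backward'
--     return 'f'
-- ===== SOURCE B (Python) =====
-- def convert_absolute_to_relative_action_chain(absolute_action_chain):
--     idx = {'u': 0, 'r': 1, 'd': 2, 'l': 3}
--     turns = 'frbl'
--     prev = absolute_action_chain[0][0]  # IndexError on empty chain, like the original
--     result = [('f', absolute_action_chain[0][1])]
--     for direction, length in absolute_action_chain[1:]:
--         if prev in idx and direction in idx:
--             char = turns[(idx[direction] - idx[prev]) % 4]
--         else: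
--             char = 'f'
--         result.append((char, length))
--         prev = direction
--     return result
-- ===== Notes on version B (the rewrite author's own statement) =====
-- stated objective: simpler
-- what changed: Replaces the 16-branch direction-pair case analysis and the double-pop/zip assembly with a single pass that maps directions to clockwise indices and computes each relative character as 'frbl'[(new-old) % 4], falling back to 'f' for unrecognized directions exactly as the original does.
import Mathlib
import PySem

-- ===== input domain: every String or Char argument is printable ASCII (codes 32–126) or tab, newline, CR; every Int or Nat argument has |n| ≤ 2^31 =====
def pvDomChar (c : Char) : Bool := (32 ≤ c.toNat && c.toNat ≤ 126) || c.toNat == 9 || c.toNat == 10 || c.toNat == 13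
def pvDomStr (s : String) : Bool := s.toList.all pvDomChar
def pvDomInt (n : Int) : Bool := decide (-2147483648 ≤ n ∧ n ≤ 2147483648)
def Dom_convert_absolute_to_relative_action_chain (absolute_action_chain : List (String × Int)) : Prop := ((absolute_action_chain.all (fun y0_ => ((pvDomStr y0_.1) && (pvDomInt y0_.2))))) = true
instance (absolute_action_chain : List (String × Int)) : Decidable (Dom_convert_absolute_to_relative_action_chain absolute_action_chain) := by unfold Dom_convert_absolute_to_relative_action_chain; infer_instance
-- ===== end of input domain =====

-- B replaces A's 16-branch pair table and pop/zip assembly with one pass using clockwise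
-- indices and 'frbl'[(new-old) % 4]; equivalence proved on nonempty chains (A raises on []).

-- ===== PORT A =====
-- s[0] in Python returns a one-character STRING; PySem.Str.pyGet? returns the Char: wrap it (exact for nonempty s)
def pvFirstChar (s : String) : String := ((PySem.Str.pyGet? s 0).map (fun c => String.ofList [c])).getD ""

def calculate_relative_with_new_abs (current_abs candidate_abs : String) : String :=
  if current_abs = "u" then
    if candidate_abs = "l" then "left"
    else if candidate_abs = "r" then "right"
    else if candidate_abs = "d" then "backward"
    else "f"
  else if current_abs = "r" then
    if candidate_abs = "u" then "left"
    else if candidate_abs = "d" then "right"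
    else if candidate_abs = "l" then "backward"
    else "f"
  else if current_abs = "d" then
    if candidate_abs = "r" then "left"
    else if candidate_abs = "l" then "right"
    else if candidate_abs = "u" then "backward"
    else "f"
  else if current_abs = "l" then
    if candidate_abs = "u" then "right"
    else if candidate_abs = "d" then "left"
    else if candidate_abs = "r" then "backward"
    else "f"
  else "f"

-- the while loop: pop directions from the front, append the relative word
def pvALoop (current_abs : String) (directions : List String) (relative_action_chain : List String) : List String :=
  match directions with
  | [] => relative_action_chain
  | candidate_abs :: rest =>
      pvALoop candidate_abs rest (relative_action_chain ++ [calculate_relative_with_new_abs current_abs candidate_abs])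

def convert_absolute_to_relative_action_chain (absolute_action_chain : List (String × Int)) : List (String × Int) :=
  match absolute_action_chain.map Prod.fst with
  | [] => []   -- unreachable under Pre_: Python raises IndexError on the empty chain
  | current_abs :: directions =>
      let relative_action_chain := pvALoop current_abs directions ["forward"]
      (absolute_action_chain.zip relative_action_chain).map
        (fun item => (pvFirstChar item.2, item.1.2))  -- item[1][0]; words are nonempty so pyGet? is some

-- ===== PORT B =====
-- turns[k] in Python is a one-character string; exact for in-range k (k = (j-i) % 4 here)
def pvFirstCharB (s : String) (i : Int) : String := ((PySem.Str.pyGet? s i).map (fun c => String.ofList [c])).getD ""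

def pvIdx? (s : String) : Option Int :=
  if s = "u" then some 0 else if s = "r" then some 1
  else if s = "d" then some 2 else if s = "l" then some 3 else none

def pvTurnChar (prev direction : String) : String :=
  match pvIdx? prev, pvIdx? direction with
  | some i, some j => pvFirstCharB "frbl" (PySem.Int.mod (j - i) 4)  -- turns[(idx[d]-idx[prev]) % 4]
  | _, _ => "f"

def pvBLoop (prev : String) (rest : List (String × Int)) (result : List (String × Int)) : List (String × Int) :=
  match rest with
  | [] => result
  | (direction, length) :: rs =>
      pvBLoop direction rs (result ++ [(pvTurnChar prev direction, length)])

def convert_absolute_to_relative_action_chain_alt (absolute_action_chain : List (String × Int)) : List (String × Int) :=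
  match absolute_action_chain with
  | [] => []   -- unreachable under Pre_: Python raises IndexError on the empty chain
  | (d, length) :: rest => pvBLoop d rest [("f", length)]

-- ===== PRECONDITION & SPEC =====
-- Pre_ excludes only the empty chain, on which both Pythons raise IndexError.
def Pre_convert_absolute_to_relative_action_chain (absolute_action_chain : List (String × Int)) : Prop :=
  absolute_action_chain ≠ []
instance (absolute_action_chain : List (String × Int)) : Decidable (Pre_convert_absolute_to_relative_action_chain absolute_action_chain) := by unfold Pre_convert_absolute_to_relative_action_chain; infer_instance

def pvWitness_convert_absolute_to_relative_action_chain : (List (String × Int)) :=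
  [("u", 3), ("l", 2), ("d", 9), ("x", 4)]

def Spec_convert_absolute_to_relative_action_chain (absolute_action_chain : List (String × Int)) (out : List (String × Int)) : Prop := out = convert_absolute_to_relative_action_chain_alt absolute_action_chain
instance (absolute_action_chain : List (String × Int)) (out : List (String × Int)) : Decidable (Spec_convert_absolute_to_relative_action_chain absolute_action_chain out) := by unfold Spec_convert_absolute_to_relative_action_chain; infer_instance

-- ===== CLAIM (what is proved, stated in full; the proofs are below) =====
def Claim_equal_convert_absolute_to_relative_action_chain : Prop := ∀ (absolute_action_chain : List (String × Int)), Dom_convert_absolute_to_relative_action_chain absolute_action_chain → Pre_convert_absolute_to_relative_action_chain absolute_action_chain → Spec_convert_absolute_to_relative_action_chain absolute_action_chain (convert_absolute_to_relative_action_chain absolute_action_chain)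

-- ===== LEMMAS AND PROOFS =====

-- first character of A's relative word equals B's turn character
theorem pvFirst_calc_eq_turn (cur cand : String) :
    pvFirstChar (calculate_relative_with_new_abs cur cand) = pvTurnChar cur cand := by
  by_cases hc : cur = "u" ∨ cur = "r" ∨ cur = "d" ∨ cur = "l"
  · by_cases hd : cand = "u" ∨ cand = "r" ∨ cand = "d" ∨ cand = "l"
    · rcases hc with h | h | h | h <;> rcases hd with h' | h' | h' | h' <;> subst h <;> subst h' <;> decide
    · push Not at hd
      obtain ⟨h1, h2, h3, h4⟩ := hd
      rcases hc with h | h | h | h <;> subst h <;>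
        simp [calculate_relative_with_new_abs, pvTurnChar, pvIdx?, h1, h2, h3, h4] <;> decide
  · push Not at hc
    obtain ⟨h1, h2, h3, h4⟩ := hc
    simp [calculate_relative_with_new_abs, pvTurnChar, pvIdx?, h1, h2, h3, h4]
    decide

-- accumulator form of A's loop
theorem pvALoop_acc (cur : String) (dirs : List String) (acc : List String) :
    pvALoop cur dirs acc = acc ++ pvALoop cur dirs [] := by
  induction dirs generalizing cur acc with
  | nil => simp [pvALoop]
  | cons c rs ih =>
      rw [pvALoop, pvALoop, ih c, ih c (_ ++ _)]
      simp

-- accumulator form of B's loop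
theorem pvBLoop_acc (prev : String) (rest : List (String × Int)) (acc : List (String × Int)) :
    pvBLoop prev rest acc = acc ++ pvBLoop prev rest [] := by
  induction rest generalizing prev acc with
  | nil => simp [pvBLoop]
  | cons p rs ih =>
      obtain ⟨d, l⟩ := p
      rw [pvBLoop, pvBLoop, ih d, ih d (_ ++ _)]
      simp

-- A's zip-and-project over the tail equals B's loop body
theorem pvTail_eq (rest : List (String × Int)) :
    ∀ d : String,
      (rest.zip (pvALoop d (rest.map Prod.fst) [])).map
        (fun item => (pvFirstChar item.2, item.1.2))
      = pvBLoop d rest [] := by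
  induction rest with
  | nil => intro d; simp [pvALoop, pvBLoop]
  | cons p rs ih =>
      intro d
      obtain ⟨d2, l2⟩ := p
      rw [List.map_cons]
      show ((((d2, l2) : String × Int) :: rs).zip (pvALoop d (d2 :: rs.map Prod.fst) [])).map _ = _
      rw [pvALoop, pvALoop_acc, pvBLoop, pvBLoop_acc]
      simp only [List.nil_append, List.singleton_append, List.zip_cons_cons, List.map_cons]
      rw [ih d2, pvFirst_calc_eq_turn]

-- ===== VERDICT (by name: the statement is the Claim_ definition above) =====
theorem convert_absolute_to_relative_action_chain_spec : Claim_equal_convert_absolute_to_relative_action_chain := by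
  intro chain _ hpre
  unfold Spec_convert_absolute_to_relative_action_chain
  match chain with
  | [] => exact absurd rfl hpre
  | (d, len) :: rest =>
      show convert_absolute_to_relative_action_chain ((d, len) :: rest)
            = convert_absolute_to_relative_action_chain_alt ((d, len) :: rest)
      rw [convert_absolute_to_relative_action_chain_alt]
      rw [convert_absolute_to_relative_action_chain]
      simp only [List.map_cons]
      rw [pvALoop_acc, pvBLoop_acc]
      simp only [List.singleton_append, List.zip_cons_cons, List.map_cons]
      rw [pvTail_eq]
      have h : pvFirstChar "forward" = "f" := by decide
      rw [h]
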